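-- pv_equiv track=rewrite | github.com/yehnan/python_book_slides | code_4/perm.py | perm_gf
-- ===== SOURCE A (Python) =====
-- from itertools import permutations
--
-- p = permutations
--
-- def perm_gf(iterable, r=None, p=()):
--     items = tuple(iterable)
--     n = len(items)
--     r = n if r is None else r
--
--     if r == 0:
--         yield p
--     else:
--         for i in range(n):
--             yield from perm_gf(items[:i] + items[i+1:], r-1, p+(items[i],))
-- ===== SOURCE B (Python) =====
-- def perm_gf(iterable, r=None, p=()):
--     items = tuple(iterable)
--     n = len(items)
--     r = n if r is None else r
--     if r < 0 or r > n:
--         return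
--     level = [(p, items)]
--     for _ in range(r):
--         level = [(chosen + (rest[i],), rest[:i] + rest[i + 1:])
--                  for chosen, rest in level
--                  for i in range(len(rest))]
--     for chosen, _ in level:
--         yield chosen
-- ===== Notes on version B (the rewrite author's own statement) =====
-- stated objective: alternative
-- what changed: Replaces A's depth-first recursion (recursive calls carrying sliced copies and a growing prefix) with a non-recursive breadth-first level expansion: a list of (prefix, remaining) states is expanded r times by one comprehension, then the prefixes are emitted.
import Mathlib
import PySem

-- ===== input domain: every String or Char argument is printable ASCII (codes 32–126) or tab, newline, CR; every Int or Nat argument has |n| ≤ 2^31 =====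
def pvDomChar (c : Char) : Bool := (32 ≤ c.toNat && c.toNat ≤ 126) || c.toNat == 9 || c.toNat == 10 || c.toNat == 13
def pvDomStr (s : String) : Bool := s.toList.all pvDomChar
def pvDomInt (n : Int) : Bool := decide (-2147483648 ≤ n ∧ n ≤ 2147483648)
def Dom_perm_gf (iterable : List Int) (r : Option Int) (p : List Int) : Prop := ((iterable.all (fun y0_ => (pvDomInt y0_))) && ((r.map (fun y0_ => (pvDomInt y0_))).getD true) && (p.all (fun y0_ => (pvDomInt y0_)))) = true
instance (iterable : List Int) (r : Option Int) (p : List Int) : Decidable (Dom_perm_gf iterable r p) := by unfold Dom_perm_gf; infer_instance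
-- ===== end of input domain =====

-- B replaces A's depth-first recursion by a non-recursive breadth-first level expansion; alternative structure, same cost.

-- ===== PORT A =====
-- Recursive generator: yield p at r == 0, else recurse on each items[:i]+items[i+1:].
-- Slices items[:i] / items[i+1:] with 0 ≤ i < len(items) are exactly take/drop;
-- items[i] with i < len(items) is exactly getD.
def permGfGo (items : List Int) (r : Int) (p : List Int) : List (List Int) :=
  if r = 0 then [p]
  else
    (List.range items.length).attach.flatMap
      (fun i => permGfGo (items.take i.1 ++ items.drop (i.1 + 1)) (r - 1) (p ++ [items.getD i.1 0]))
termination_by items.length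
decreasing_by
  have hi := List.mem_range.mp i.2
  simp only [List.length_append, List.length_take, List.length_drop]
  omega

def perm_gf (iterable : List Int) (r : Option Int) (p : List Int) : List (List Int) :=
  let items := iterable
  let n : Int := items.length
  let rr : Int := match r with | none => n | some v => v
  permGfGo items rr p

-- ===== PORT B =====
-- one breadth-first expansion step over (prefix, remaining) states
def permStep (lvl : List (List Int × List Int)) : List (List Int × List Int) :=
  lvl.flatMap (fun s =>
    (List.range s.2.length).map
      (fun i => (s.1 ++ [s.2.getD i 0], s.2.take i ++ s.2.drop (i + 1))))

def perm_gf_alt (iterable : List Int) (r : Option Int) (p : List Int) : List (List Int) :=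
  let items := iterable
  let n : Int := items.length
  let rr : Int := match r with | none => n | some v => v
  if rr < 0 || n < rr then []
  else
    ((List.range rr.toNat).foldl (fun lvl _ => permStep lvl) [(p, items)]).map Prod.fst

-- ===== PRECONDITION & SPEC =====
def Spec_perm_gf (iterable : List Int) (r : Option Int) (p : List Int) (out : List (List Int)) : Prop := out = perm_gf_alt iterable r p
instance (iterable : List Int) (r : Option Int) (p : List Int) (out : List (List Int)) : Decidable (Spec_perm_gf iterable r p out) := by unfold Spec_perm_gf; infer_instance

-- ===== CLAIM (what is proved, stated in full; the proofs are below) =====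
def Claim_equal_perm_gf : Prop := ∀ (iterable : List Int) (r : Option Int) (p : List Int), Dom_perm_gf iterable r p → Spec_perm_gf iterable r p (perm_gf iterable r p)

-- ===== LEMMAS AND PROOFS =====

theorem foldl_step_iterate (k : Nat) (a : List (List Int × List Int)) :
    (List.range k).foldl (fun lvl _ => permStep lvl) a = permStep^[k] a := by
  induction k with
  | zero => simp
  | succ k ih =>
      rw [List.range_succ, List.foldl_append, ih]
      simp [Function.iterate_succ_apply']

theorem permStep_append (a b : List (List Int × List Int)) :
    permStep (a ++ b) = permStep a ++ permStep b := by
  simp [permStep]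

theorem iterate_step_append (k : Nat) (a b : List (List Int × List Int)) :
    permStep^[k] (a ++ b) = permStep^[k] a ++ permStep^[k] b := by
  induction k generalizing a b with
  | zero => simp
  | succ k ih => simp [Function.iterate_succ_apply, permStep_append, ih]

theorem iterate_step_nil (k : Nat) : permStep^[k] ([] : List (List Int × List Int)) = [] := by
  induction k with
  | zero => simp
  | succ k ih => simp [Function.iterate_succ_apply, permStep, ih]

theorem iterate_step_flatMap {α : Type} (k : Nat) (l : List α)
    (f : α → List (List Int × List Int)) :
    permStep^[k] (l.flatMap f) = l.flatMap (fun x => permStep^[k] (f x)) := by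
  induction l with
  | nil => simp [iterate_step_nil]
  | cons x xs ih => simp [List.flatMap_cons, iterate_step_append, ih]

theorem permGfGo_eq_levels (k : Nat) :
    ∀ (items : List Int) (r : Int) (c : List Int), r.toNat = k → 0 ≤ r →
      permGfGo items r c = (permStep^[k] [(c, items)]).map Prod.fst := by
  induction k with
  | zero =>
      intro items r c hk hr
      have : r = 0 := by omega
      subst this
      simp [permGfGo]
  | succ k ih =>
      intro items r c hk hr
      have hne : r ≠ 0 := by omega
      rw [permGfGo, if_neg hne]
      have hstep : permStep [(c, items)] =
          (List.range items.length).attach.flatMap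
            (fun i => [(c ++ [items.getD i.1 0], items.take i.1 ++ items.drop (i.1 + 1))]) := by
        simp [permStep, List.flatMap_cons, ← List.map_eq_flatMap]
      have ih' : ∀ (its cc : List Int), permGfGo its (r - 1) cc = (permStep^[k] [(cc, its)]).map Prod.fst :=
        fun its cc => ih its (r - 1) cc (by omega) (by omega)
      simp only [ih']
      rw [← List.map_flatMap, ← iterate_step_flatMap, ← hstep, ← Function.iterate_succ_apply]

theorem permGfGo_neg : ∀ (n : Nat) (items : List Int), items.length = n →
    ∀ (r : Int) (c : List Int), r < 0 → permGfGo items r c = [] := by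
  intro n
  induction n using Nat.strong_induction_on with
  | _ n ih =>
    intro items hlen r c hr
    rw [permGfGo, if_neg (by omega)]
    rw [List.flatMap_eq_nil_iff]
    intro i hi
    have hmem := List.mem_range.mp i.2
    exact ih (n - 1) (by omega) _ (by simp; omega) (r - 1) _ (by omega)

theorem permGfGo_gt : ∀ (n : Nat) (items : List Int), items.length = n →
    ∀ (r : Int) (c : List Int), (n : Int) < r → permGfGo items r c = [] := by
  intro n
  induction n using Nat.strong_induction_on with
  | _ n ih =>
    intro items hlen r c hr
    rw [permGfGo, if_neg (by omega)]
    rw [List.flatMap_eq_nil_iff]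
    intro i hi
    have hmem := List.mem_range.mp i.2
    exact ih (n - 1) (by omega) _ (by simp; omega) (r - 1) _ (by omega)

theorem perm_gf_eq (iterable : List Int) (rr : Int) (p : List Int) :
    permGfGo iterable rr p =
      (if rr < 0 || (iterable.length : Int) < rr then []
       else ((List.range rr.toNat).foldl (fun lvl _ => permStep lvl) [(p, iterable)]).map Prod.fst) := by
  split_ifs with h
  · simp only [Bool.or_eq_true, decide_eq_true_eq] at h
    rcases h with h' | h'
    · exact permGfGo_neg iterable.length iterable rfl rr p h'
    · exact permGfGo_gt iterable.length iterable rfl rr p h'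
  · rw [foldl_step_iterate]
    simp only [Bool.or_eq_true, decide_eq_true_eq, not_or, not_lt] at h
    exact permGfGo_eq_levels rr.toNat iterable rr p rfl (by omega)

-- ===== VERDICT (by name: the statement is the Claim_ definition above) =====
theorem perm_gf_spec : Claim_equal_perm_gf := by
  intro iterable r p _
  unfold Spec_perm_gf perm_gf perm_gf_alt
  exact perm_gf_eq iterable _ p
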